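-- pv_equiv track=rewrite | github.com/SahilMaheshwari/Autocal | coursemaker.py | datedefiner
-- ===== SOURCE A (Python) =====
-- def datedefiner(Times):
--
--     Times = str(Times)
--     Times.split()
--
--     days = ['M', 'T', 'W', 'TH', 'F', 'S']
--     slots = [str(i+1) for i in range(11)]
--
--     defined = []
--     temp = []
--     wasDate = True
--
--     for i in Times:
--         i = i[0]
--
--         if i in days and wasDate:
--             temp.append([i])
--             wasDate = True
--
--         elif i in days and not wasDate:
--             temp = []
--             temp.append([i])
--             wasDate = True
--
--         elif i in slots and wasDate:
--             for j in range(len(temp)):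
--                 temp[j].append(i)
--                 defined.append(temp[j])
--             wasDate = False
--
--         elif i in slots and not wasDate:
--             for j in range(len(temp)):
--                 temp[j].append(i)
--             wasDate = False
--
--     return defined
-- ===== SOURCE B (Python) =====
-- def datedefiner(Times):
--     # Two-phase: tokenize into maximal runs of day/slot chars (junk skipped),
--     # then emit a group [day]+slots for each day of a day-run followed by a slot-run.
--     Times = str(Times)
--     day_chars = "MTWFS"
--     slot_chars = "123456789"
--     chars = [c for c in Times if c in day_chars or c in slot_chars]
--     runs = []
--     i = 0
--     n = len(chars)
--     while i < n:
--         is_day = chars[i] in day_chars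
--         j = i
--         while j < n and (chars[j] in day_chars) == is_day:
--             j += 1
--         runs.append((is_day, chars[i:j]))
--         i = j
--     out = []
--     for (t1, g1), (t2, g2) in zip(runs, runs[1:]):
--         if t1 and not t2:
--             for d in g1:
--                 out.append([d] + g2)
--     return out
-- ===== Notes on version B (the rewrite author's own statement) =====
-- stated objective: alternative
-- what changed: B replaces A's char-by-char state machine with mutable aliased temp lists by a two-phase pass: tokenize the day/slot characters into maximal same-kind runs, then emit groups for each adjacent day-run/slot-run pair.
import Mathlib
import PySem

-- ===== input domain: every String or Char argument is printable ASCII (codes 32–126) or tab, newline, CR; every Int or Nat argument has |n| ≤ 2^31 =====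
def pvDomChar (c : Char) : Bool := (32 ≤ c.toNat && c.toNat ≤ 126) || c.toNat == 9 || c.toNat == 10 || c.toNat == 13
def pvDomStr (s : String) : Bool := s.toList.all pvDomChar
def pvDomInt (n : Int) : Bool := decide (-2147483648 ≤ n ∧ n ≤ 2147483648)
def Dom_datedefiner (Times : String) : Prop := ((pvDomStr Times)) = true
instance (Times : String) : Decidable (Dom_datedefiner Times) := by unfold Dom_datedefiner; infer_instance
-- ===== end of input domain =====

-- B replaces A's char-by-char mutable-aliasing state machine by a two-phase
-- tokenize-into-runs pass followed by an adjacent-run pairing scan (objective: alternative).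

-- ===== PORT A =====
-- Python's `i in days` / `i in slots` test a 1-char string against string lists;
-- the multi-char entries 'TH', '10', '11' can never equal a 1-char string, so the
-- membership is ported exactly as membership in the 1-char entries.
def pvDaysA : List Char := ['M', 'T', 'W', 'F', 'S']
def pvSlotsA : List Char := ['1', '2', '3', '4', '5', '6', '7', '8', '9']

-- State (defined, temp, wasDate). Python's temp entries are ALIASED into defined:
-- after an emission, defined's last temp.length entries ARE temp, so the in-place
-- `temp[j].append(i)` of the fourth branch is modeled exactly by replacing that
-- suffix of defined with the updated temp.
def pvStepA (st : List (List String) × List (List String) × Bool) (i : Char) :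
    List (List String) × List (List String) × Bool :=
  match st with
  | (defined, temp, wasDate) =>
    if pvDaysA.contains i && wasDate then
      (defined, temp ++ [[i.toString]], true)
    else if pvDaysA.contains i && !wasDate then
      (defined, [[i.toString]], true)
    else if pvSlotsA.contains i && wasDate then
      let t := temp.map (fun g => g ++ [i.toString])
      (defined ++ t, t, false)
    else if pvSlotsA.contains i && !wasDate then
      let t := temp.map (fun g => g ++ [i.toString])
      (defined.take (defined.length - temp.length) ++ t, t, false)
    else st

def datedefiner (Times : String) : List (List String) :=
  (Times.toList.foldl pvStepA ([], [], true)).1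

-- ===== PORT B =====
def pvDayB (c : Char) : Bool := "MTWFS".toList.contains c
def pvSlotB (c : Char) : Bool := "123456789".toList.contains c

-- the run-building while loop of Source B: take the maximal same-kind prefix, recurse on the rest
def pvRunsB : List Char → List (Bool × List String)
  | [] => []
  | c :: cs =>
    let t := pvDayB c
    (t, (c :: cs.takeWhile (fun x => pvDayB x == t)).map Char.toString) ::
      pvRunsB (cs.dropWhile (fun x => pvDayB x == t))
termination_by cs => cs.length
decreasing_by
  simp only [List.length_cons]
  exact Nat.lt_succ_of_le (List.length_dropWhile_le _ _)

def datedefiner_alt (Times : String) : List (List String) :=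
  let chars := Times.toList.filter (fun c => pvDayB c || pvSlotB c)
  let runs := pvRunsB chars
  (runs.zip runs.tail).foldl
    (fun out p => if p.1.1 && !p.2.1 then out ++ p.1.2.map (fun d => d :: p.2.2) else out) []

-- ===== PRECONDITION & SPEC =====
def Spec_datedefiner (Times : String) (out : List (List String)) : Prop := out = datedefiner_alt Times
instance (Times : String) (out : List (List String)) : Decidable (Spec_datedefiner Times out) := by unfold Spec_datedefiner; infer_instance

-- ===== CLAIM (what is proved, stated in full; the proofs are below) =====
def Claim_equal_datedefiner : Prop := ∀ (Times : String), Dom_datedefiner Times → Spec_datedefiner Times (datedefiner Times)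

-- ===== LEMMAS AND PROOFS =====

def pvGood (c : Char) : Bool := pvDayB c || pvSlotB c

-- common reference function: output of the remaining input, given the pending
-- day run (Eday) or the current open groups ds × ss (Eslot)
mutual
def Eday : List String → List Char → List (List String)
  | _, [] => []
  | ds, c :: cs =>
    if pvDayB c then Eday (ds ++ [c.toString]) cs
    else Eslot ds [c.toString] cs
termination_by _ cs => cs.length

def Eslot : List String → List String → List Char → List (List String)
  | ds, ss, [] => ds.map (fun d => d :: ss)
  | ds, ss, c :: cs =>
    if pvDayB c then (ds.map (fun d => d :: ss)) ++ Eday [c.toString] cs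
    else Eslot ds (ss ++ [c.toString]) cs
termination_by _ _ cs => cs.length
end

theorem dayAB (c : Char) : pvDaysA.contains c = pvDayB c := rfl

theorem slotAB (c : Char) : pvSlotsA.contains c = pvSlotB c := rfl

theorem dayMem (c : Char) : (c ∈ pvDaysA) ↔ pvDayB c = true := by
  rw [← dayAB, List.contains_eq_mem, decide_eq_true_iff]

theorem slotMem (c : Char) : (c ∈ pvSlotsA) ↔ pvSlotB c = true := by
  rw [← slotAB, List.contains_eq_mem, decide_eq_true_iff]

theorem stepA_bad (st : List (List String) × List (List String) × Bool) (c : Char)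
    (h : pvGood c = false) : pvStepA st c = st := by
  obtain ⟨d, t, w⟩ := st
  have hd : pvDayB c = false := by
    simp [pvGood, Bool.or_eq_false_iff] at h; exact h.1
  have hs : pvSlotB c = false := by
    simp [pvGood, Bool.or_eq_false_iff] at h; exact h.2
  simp [pvStepA, dayMem, slotMem, hd, hs]

theorem foldlA_filter (cs : List Char) :
    ∀ st, cs.foldl pvStepA st = (cs.filter pvGood).foldl pvStepA st := by
  induction cs with
  | nil => intro st; rfl
  | cons c cs ih =>
    intro st
    by_cases h : pvGood c = true
    · simp [h, List.foldl_cons, ih]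
    · have h' : pvGood c = false := by simpa using h
      simp [h', List.foldl_cons, stepA_bad _ _ h', ih]

-- A's machine computes E, jointly for the two modes
theorem AE (cs : List Char) (hg : ∀ c ∈ cs, pvGood c = true) :
    (∀ D ds, (cs.foldl pvStepA (D, ds.map (fun d => [d]), true)).1 = D ++ Eday ds cs) ∧
    (∀ D ds ss, (cs.foldl pvStepA
        (D ++ ds.map (fun d => d :: ss), ds.map (fun d => d :: ss), false)).1
      = D ++ Eslot ds ss cs) := by
  induction cs with
  | nil => exact ⟨fun D ds => by simp [Eday], fun D ds ss => by simp [Eslot]⟩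
  | cons c cs ih =>
    have hc : pvGood c = true := hg c (by simp)
    have ih' := ih (fun x hx => hg x (by simp [hx]))
    by_cases hd : pvDayB c = true
    · refine ⟨fun D ds => ?_, fun D ds ss => ?_⟩
      · rw [List.foldl_cons]
        have hstep : pvStepA (D, ds.map (fun d => [d]), true) c
            = (D, ((ds ++ [c.toString]).map (fun d => [d])), true) := by
          simp [pvStepA, dayMem, hd]
        rw [hstep, ih'.1, Eday, if_pos hd]
      · rw [List.foldl_cons]
        have hstep : pvStepA (D ++ ds.map (fun d => d :: ss), ds.map (fun d => d :: ss), false) c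
            = (D ++ ds.map (fun d => d :: ss), [c.toString].map (fun d => [d]), true) := by
          simp [pvStepA, dayMem, hd]
        rw [hstep, ih'.1, Eslot, if_pos hd, List.append_assoc]
    · have hd' : pvDayB c = false := by simpa using hd
      have hs : pvSlotB c = true := by
        have := hc; simp [pvGood, hd'] at this; exact this
      refine ⟨fun D ds => ?_, fun D ds ss => ?_⟩
      · rw [List.foldl_cons]
        have hstep : pvStepA (D, ds.map (fun d => [d]), true) c
            = (D ++ ds.map (fun d => d :: [c.toString]),
               ds.map (fun d => d :: [c.toString]), false) := by
          simp [pvStepA, dayMem, hd', slotMem, hs, List.map_map]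
        rw [hstep, ih'.2, Eday, if_neg (by simp [hd'])]
      · rw [List.foldl_cons]
        have hstep : pvStepA (D ++ ds.map (fun d => d :: ss), ds.map (fun d => d :: ss), false) c
            = (D ++ ds.map (fun d => d :: (ss ++ [c.toString])),
               ds.map (fun d => d :: (ss ++ [c.toString])), false) := by
          simp [pvStepA, dayMem, hd', slotMem, hs, List.map_map]
        rw [hstep, ih'.2, Eslot, if_neg (by simp [hd'])]

-- B side --------------------------------------------------------------------

def emitRuns : List (Bool × List String) → List (List String)
  | [] => []
  | [_] => []
  | r1 :: r2 :: rs =>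
    (if r1.1 && !r2.1 then r1.2.map (fun d => d :: r2.2) else []) ++ emitRuns (r2 :: rs)

theorem foldl_zip_emitRuns (l : List (Bool × List String)) :
    ∀ acc, (l.zip l.tail).foldl
        (fun out p => if p.1.1 && !p.2.1 then out ++ p.1.2.map (fun d => d :: p.2.2) else out) acc
      = acc ++ emitRuns l := by
  induction l with
  | nil => intro acc; simp [emitRuns]
  | cons r1 l ih =>
    intro acc
    cases l with
    | nil => simp [emitRuns]
    | cons r2 rs =>
      simp only [List.tail_cons, List.zip_cons_cons, List.foldl_cons]
      rw [show ((r2 :: rs).zip rs) = ((r2 :: rs).zip (r2 :: rs).tail) from rfl, ih]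
      by_cases h : (r1.1 && !r2.1) = true
      · simp [emitRuns, h, List.append_assoc]
      · have h' : (r1.1 && !r2.1) = false := by simpa using h
        simp [emitRuns, h']

theorem emitRuns_false_cons (x : Bool × List String) (hx : x.1 = false)
    (rs : List (Bool × List String)) : emitRuns (x :: rs) = emitRuns rs := by
  cases rs with
  | nil => rfl
  | cons r rs => simp [emitRuns, hx]

theorem Eday_run (w : List Char) (hw : ∀ c ∈ w, pvDayB c = true) :
    ∀ ds rest, Eday ds (w ++ rest) = Eday (ds ++ w.map Char.toString) rest := by
  induction w with
  | nil => intro ds rest; simp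
  | cons c w ih =>
    intro ds rest
    have hc : pvDayB c = true := hw c (by simp)
    rw [List.cons_append, Eday, if_pos hc, ih (fun x hx => hw x (by simp [hx]))]
    simp

theorem pvRunsB_cons (c : Char) (cs : List Char) :
    pvRunsB (c :: cs)
      = (pvDayB c, (c :: cs.takeWhile (fun x => pvDayB x == pvDayB c)).map Char.toString)
        :: pvRunsB (cs.dropWhile (fun x => pvDayB x == pvDayB c)) := by
  rw [pvRunsB]

theorem Eslot_split (cs : List Char) : ∀ (g ss : List String),
    Eslot g ss cs
      = g.map (fun d => d :: (ss ++ (cs.takeWhile (fun x => pvDayB x == false)).map Char.toString))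
        ++ Eday [] (cs.dropWhile (fun x => pvDayB x == false)) := by
  induction cs with
  | nil => intro g ss; simp [Eslot, Eday]
  | cons c cs ih =>
    intro g ss
    by_cases hd : pvDayB c = true
    · rw [Eslot, if_pos hd]
      simp [hd, Eday]
    · have hd' : pvDayB c = false := by simpa using hd
      rw [Eslot, if_neg hd, ih]
      simp [hd', List.append_assoc]

theorem BE (cs : List Char) : emitRuns (pvRunsB cs) = Eday [] cs := by
  induction cs using pvRunsB.induct with
  | case1 => simp [pvRunsB, emitRuns, Eday]
  | case2 c cs t ih =>
    by_cases hd : pvDayB c = true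
    · -- leading day run
      have hwday : ∀ x ∈ cs.takeWhile (fun x => pvDayB x == pvDayB c), pvDayB x = true := by
        intro x hx
        have := List.mem_takeWhile_imp hx
        simp [hd] at this; exact this
      have hsplit : cs
          = cs.takeWhile (fun x => pvDayB x == pvDayB c)
            ++ cs.dropWhile (fun x => pvDayB x == pvDayB c) :=
        (List.takeWhile_append_dropWhile).symm
      have hE : Eday [] (c :: cs)
          = Eday ((c :: cs.takeWhile (fun x => pvDayB x == pvDayB c)).map Char.toString)
              (cs.dropWhile (fun x => pvDayB x == pvDayB c)) := by
        rw [Eday, if_pos hd]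
        conv_lhs => rw [hsplit]
        rw [Eday_run _ hwday]
        simp
      rw [hE, pvRunsB_cons]
      cases hre : cs.dropWhile (fun x => pvDayB x == pvDayB c) with
      | nil => simp [pvRunsB, emitRuns, Eday]
      | cons c2 cs2 =>
        have hc2 : pvDayB c2 = false := by
          have hnot := List.head?_dropWhile_not (fun x => pvDayB x == pvDayB c) cs
          rw [hre] at hnot
          simp [hd] at hnot
          exact hnot
        have hcc : ¬ pvDayB c2 = true := by simp [hc2]
        rw [hre] at ih
        rw [pvRunsB_cons c2 cs2, hc2]
        rw [emitRuns]
        rw [emitRuns_false_cons _ rfl]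
        have hEd : Eday [] (c2 :: cs2)
            = Eday [] (cs2.dropWhile (fun x => pvDayB x == false)) := by
          rw [Eday, if_neg hcc, Eslot_split]
          simp
        have hih : emitRuns (pvRunsB (cs2.dropWhile (fun x => pvDayB x == false)))
            = Eday [] (c2 :: cs2) := by
          rw [← ih, pvRunsB_cons c2 cs2, hc2, emitRuns_false_cons _ rfl]
        rw [hih, hEd]
        conv_rhs => rw [Eday, if_neg hcc, Eslot_split]
        simp [hd]
    · have hd' : pvDayB c = false := by simpa using hd
      have ht : t = false := hd'
      rw [ht] at ih
      rw [pvRunsB_cons, hd']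
      rw [emitRuns_false_cons _ rfl, ih]
      have hcc : ¬ pvDayB c = true := by simp [hd']
      conv_rhs => rw [Eday, if_neg hcc, Eslot_split]
      simp

theorem good_filter (l : List Char) : ∀ c ∈ l.filter pvGood, pvGood c = true := by
  intro c hc; exact (List.mem_filter.mp hc).2

-- ===== VERDICT (by name: the statement is the Claim_ definition above) =====
theorem datedefiner_spec : Claim_equal_datedefiner := by
  intro Times _
  show datedefiner Times = datedefiner_alt Times
  have h := (AE (Times.toList.filter pvGood) (good_filter _)).1 [] []
  simp only [List.map_nil] at h
  have hA : datedefiner Times = Eday [] (Times.toList.filter pvGood) := by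
    simp only [datedefiner]
    rw [foldlA_filter, h, List.nil_append]
  have hB : datedefiner_alt Times = emitRuns (pvRunsB (Times.toList.filter pvGood)) := by
    simp only [datedefiner_alt]
    rw [foldl_zip_emitRuns]
    simp only [List.nil_append]
    rfl
  rw [hA, hB, BE]
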